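-- pv_equiv track=rewrite | github.com/Zelbot/lisbot | cogs/quotes.py | get_char_pair_overview
-- ===== SOURCE A (Python) =====
-- def get_char_pair_overview(quotes):
--     """
--     Prepares an overview of all dialogue pairs.
--     """
--     char_pairs = sorted([char for char in quotes if '&' in char])
--     quotes_lens = [str(len(quotes[char])) for char in char_pairs]
--     longest_quote = len(max(quotes_lens, key=len))
--
--     firsts_of_pairs = []
--     seconds_of_pairs = []
--     for pair in char_pairs:
--         first_char, second_char = pair.split('&')
--         firsts_of_pairs.append(first_char.strip())
--         seconds_of_pairs.append(second_char.strip())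
--
--     # Add padding and ampersand
--     longest_str = len(max(firsts_of_pairs, key=len))
--     for index, name in enumerate(firsts_of_pairs[:]):
--         firsts_of_pairs[index] = name.ljust(longest_str) + '  &  '
--
--     # Add padding and quote count
--     longest_str = len(max(seconds_of_pairs, key=len))
--     for index, name in enumerate(seconds_of_pairs[:]):
--         padded_name = name.ljust(longest_str) + '  -  '
--         pair = char_pairs[index]
--         padded_count = str(len(quotes[pair])).rjust(longest_quote)
--         seconds_of_pairs[index] = padded_name + padded_count
--
--     # Add padding and "quote" or "quotes"
--     longest_str = len(max(seconds_of_pairs, key=len))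
--     for index, name in enumerate(seconds_of_pairs[:]):
--         pair = char_pairs[index]
--         padded_str = name.ljust(longest_str + 1)
--
--         if len(quotes[pair]) == 1:
--             padded_str += 'quote'
--         else:
--             padded_str += 'quotes'
--
--         seconds_of_pairs[index] = padded_str
--
--     # Build overview in the format of "Joyce Price & Chloe Price - N quotes"
--     overview = ''
--     for index, name in enumerate(firsts_of_pairs):
--         overview += firsts_of_pairs[index] + seconds_of_pairs[index] + '\n'
--
--     return overview.strip()
-- ===== SOURCE B (Python) =====
-- def _row(quotes, pair):
--     first, second = pair.split('&')
--     return first.strip(), second.strip(), str(len(quotes[pair])), len(quotes[pair])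
--
--
-- def get_char_pair_overview(quotes):
--     """
--     Prepares an overview of all dialogue pairs by writing each field into a
--     fixed-width character buffer at computed column offsets.
--     """
--     pairs = sorted(c for c in quotes if '&' in c)
--     rows = [_row(quotes, p) for p in pairs]
--     w1 = max(len(r[0]) for r in rows)
--     w2 = max(len(r[1]) for r in rows)
--     w3 = max(len(r[2]) for r in rows)
--     lines = []
--     for f, s, c, n in rows:
--         word = 'quote' if n == 1 else 'quotes'
--         buf = [' '] * (w1 + w2 + w3 + 11 + len(word))
--         buf[0:len(f)] = f
--         buf[w1 + 2] = '&'
--         buf[w1 + 5:w1 + 5 + len(s)] = s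
--         buf[w1 + w2 + 7] = '-'
--         pos = w1 + w2 + w3 + 10 - len(c)
--         buf[pos:pos + len(c)] = c
--         buf[w1 + w2 + w3 + 11:] = word
--         lines.append(''.join(buf))
--     return '\n'.join(lines).strip()
-- ===== Notes on version B (the rewrite author's own statement) =====
-- stated objective: alternative
-- what changed: Instead of A's five staged ljust/rjust padding-and-repadding passes over parallel lists, B renders each line by allocating a fixed-width character buffer of spaces and slice-writing the six fields (first name, '&', second name, '-', right-aligned count, quote/quotes) at computed column offsets, then joins the buffers.
import Mathlib
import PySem

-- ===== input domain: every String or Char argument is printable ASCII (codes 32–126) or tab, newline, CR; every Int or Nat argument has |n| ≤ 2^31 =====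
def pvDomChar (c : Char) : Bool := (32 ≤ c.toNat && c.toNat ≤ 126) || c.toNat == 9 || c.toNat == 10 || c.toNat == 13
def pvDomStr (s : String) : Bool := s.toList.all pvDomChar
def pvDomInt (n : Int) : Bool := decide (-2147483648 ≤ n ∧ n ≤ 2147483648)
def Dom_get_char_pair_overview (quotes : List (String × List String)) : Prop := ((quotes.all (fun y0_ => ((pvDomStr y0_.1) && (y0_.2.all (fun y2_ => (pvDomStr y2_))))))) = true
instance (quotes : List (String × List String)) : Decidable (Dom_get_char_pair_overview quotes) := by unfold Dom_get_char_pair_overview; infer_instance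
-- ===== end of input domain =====

-- B replaces A's five staged ljust/rjust padding passes over parallel lists by rendering each line
-- into a fixed-width character buffer of spaces via slice-writes at computed column offsets
-- (objective: alternative; same asymptotic cost).

-- ===== PORT A =====
-- str.ljust / str.rjust with a Nat width, padding with spaces (exact: Python pads to max(len, w))
def pvLjust (cs : List Char) (w : Nat) : List Char := cs ++ List.replicate (w - cs.length) ' '
def pvRjust (cs : List Char) (w : Nat) : List Char := List.replicate (w - cs.length) ' ' ++ cs

def get_char_pair_overview (quotes : List (String × List String)) : String :=
  let d := PySem.Dict.ofList quotes
  -- char_pairs = sorted([char for char in quotes if '&' in char])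
  let char_pairs := PySem.List.sorted (d.keys.filter (fun c => PySem.Str.isIn "&" c)) (fun x => x) false
  -- quotes_lens = [str(len(quotes[char])) for char in char_pairs]   (char is a key, lookup succeeds)
  let quotes_lens : List (List Char) := char_pairs.map (fun c => PySem.Int.toChars ((d.getD c []).length : Int))
  -- longest_quote = len(max(quotes_lens, key=len));  max([]) raises ValueError — excluded by Pre_
  let longest_quote : Nat := match PySem.List.max? quotes_lens (fun s => s.length) with
    | some m => m.length
    | none => 0   -- unreachable under Pre_ (Python raises ValueError)
  -- the split loop appending to firsts_of_pairs / seconds_of_pairs;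
  -- 'first, second = pair.split('&')' raises ValueError unless exactly 2 parts — excluded by Pre_
  let fs := char_pairs.foldl (fun (acc : List (List Char) × List (List Char)) pair =>
      match PySem.Chars.splitOn pair.toList ['&'] with
      | [f, s] => (acc.1 ++ [PySem.Chars.strip f], acc.2 ++ [PySem.Chars.strip s])
      | _ => acc)   -- unreachable under Pre_ (Python raises ValueError)
    ([], [])
  let firsts := fs.1
  let seconds := fs.2
  -- first padding pass ('for index, name in enumerate(xs[:]): xs[index] = f(name)' is a map)
  let longest_str1 : Nat := match PySem.List.max? firsts (fun s => s.length) with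
    | some m => m.length
    | none => 0
  let firsts2 := firsts.map (fun name => pvLjust name longest_str1 ++ "  &  ".toList)
  -- second padding pass (char_pairs[index] over the equal-length parallel list ported as zip)
  let longest_str2 : Nat := match PySem.List.max? seconds (fun s => s.length) with
    | some m => m.length
    | none => 0
  let seconds2 := (List.zip seconds char_pairs).map (fun p =>
      pvLjust p.1 longest_str2 ++ "  -  ".toList
        ++ pvRjust (PySem.Int.toChars ((d.getD p.2 []).length : Int)) longest_quote)
  -- third pass: pad one more column, then "quote"/"quotes"
  let longest_str3 : Nat := match PySem.List.max? seconds2 (fun s => s.length) with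
    | some m => m.length
    | none => 0
  let seconds3 := (List.zip seconds2 char_pairs).map (fun p =>
      pvLjust p.1 (longest_str3 + 1)
        ++ (if (d.getD p.2 []).length == 1 then "quote".toList else "quotes".toList))
  -- overview accumulation loop, then .strip()
  let overview := (List.zip firsts2 seconds3).foldl (fun acc p => acc ++ (p.1 ++ p.2 ++ ['\n'])) []
  String.mk (PySem.Chars.strip overview)

-- ===== PORT B =====
-- Python slice assignment buf[i:i+len(s)] = s on a buffer it fits into (all of B's writes do)
def pvWrite (buf : List Char) (i : Nat) (s : List Char) : List Char :=
  buf.take i ++ s ++ buf.drop (i + s.length)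

-- _row(quotes, pair): the unpacking 'first, second = pair.split('&')' needs exactly 2 parts
-- (guaranteed by Pre_), so it is ported as taking pieces 0 and 1 of the split
def pvRow (d : PySem.Dict String (List String)) (p : String) :
    List Char × List Char × List Char × Nat :=
  let l := PySem.Chars.splitOn p.toList ['&']
  (PySem.Chars.strip (l.getD 0 []), PySem.Chars.strip (l.getD 1 []),
   PySem.Int.toChars ((d.getD p []).length : Int), (d.getD p []).length)

def get_char_pair_overview_alt (quotes : List (String × List String)) : String :=
  let d := PySem.Dict.ofList quotes
  let pairs := PySem.List.sorted (d.keys.filter (fun c => PySem.Str.isIn "&" c)) (fun x => x) false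
  let rows := pairs.map (pvRow d)
  -- the three column widths: max over a generator raises on empty — excluded by Pre_, 0 there
  let w1 := rows.foldl (fun m r => max m r.1.length) 0
  let w2 := rows.foldl (fun m r => max m r.2.1.length) 0
  let w3 := rows.foldl (fun m r => max m r.2.2.1.length) 0
  -- one rendering pass: write the six fields into a buffer of spaces at their column offsets
  let lines := rows.map (fun r =>
    let word := if r.2.2.2 == 1 then "quote".toList else "quotes".toList
    let buf := List.replicate (w1 + w2 + w3 + 11 + word.length) ' '
    let buf := pvWrite buf 0 r.1
    let buf := pvWrite buf (w1 + 2) ['&']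
    let buf := pvWrite buf (w1 + 5) r.2.1
    let buf := pvWrite buf (w1 + w2 + 7) ['-']
    let buf := pvWrite buf (w1 + w2 + w3 + 10 - r.2.2.1.length) r.2.2.1
    pvWrite buf (w1 + w2 + w3 + 11) word)
  String.mk (PySem.Chars.strip (PySem.Chars.join ['\n'] lines))

-- ===== PRECONDITION & SPEC =====
-- Pre_ excludes exactly the inputs where the Python A raises ValueError: no key containing '&'
-- (max() over an empty list), or a '&'-key whose split('&') does not have exactly two parts
-- (tuple unpacking).  A returns normally on every other input.
def Pre_get_char_pair_overview (quotes : List (String × List String)) : Prop :=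
  let pairs := (PySem.Dict.ofList quotes).keys.filter (fun c => PySem.Str.isIn "&" c)
  pairs ≠ [] ∧ ∀ p ∈ pairs, (PySem.Chars.splitOn p.toList ['&']).length = 2
instance (quotes : List (String × List String)) : Decidable (Pre_get_char_pair_overview quotes) := by
  unfold Pre_get_char_pair_overview; infer_instance

def pvWitness_get_char_pair_overview : (List (String × List String)) :=
  [("Joyce Price & Chloe Price", ["q1", "q2"]), ("narrator", ["q"])]

def Spec_get_char_pair_overview (quotes : List (String × List String)) (out : String) : Prop :=
  out = get_char_pair_overview_alt quotes
instance (quotes : List (String × List String)) (out : String) : Decidable (Spec_get_char_pair_overview quotes out) := by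
  unfold Spec_get_char_pair_overview; infer_instance

-- ===== CLAIM (what is proved, stated in full; the proofs are below) =====
def Claim_equal_get_char_pair_overview : Prop := ∀ (quotes : List (String × List String)), Dom_get_char_pair_overview quotes → Pre_get_char_pair_overview quotes → Spec_get_char_pair_overview quotes (get_char_pair_overview quotes)

-- ===== LEMMAS AND PROOFS =====

theorem pvWitness_ok :
    Dom_get_char_pair_overview pvWitness_get_char_pair_overview ∧
    Pre_get_char_pair_overview pvWitness_get_char_pair_overview := by
  constructor <;> decide

-- the split pieces of one pair, as total functions
def pvF (p : String) : List Char := PySem.Chars.strip ((PySem.Chars.splitOn p.toList ['&']).getD 0 [])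
def pvS (p : String) : List Char := PySem.Chars.strip ((PySem.Chars.splitOn p.toList ['&']).getD 1 [])
def pvCnt (d : PySem.Dict String (List String)) (p : String) : List Char :=
  PySem.Int.toChars ((d.getD p []).length : Int)

theorem pvLjust_len_of_le (cs : List Char) (w : Nat) (h : cs.length ≤ w) :
    (pvLjust cs w).length = w := by
  simp [pvLjust]; omega

theorem pvRjust_len_of_le (cs : List Char) (w : Nat) (h : cs.length ≤ w) :
    (pvRjust cs w).length = w := by
  simp [pvRjust]; omega

theorem pvLjust_succ_self (cs : List Char) : pvLjust cs (cs.length + 1) = cs ++ [' '] := by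
  simp [pvLjust]

-- the two-accumulator append loop is a pair of maps
theorem pv_foldl_two_append {α β : Type} (F G : α → β) (xs : List α) (a b : List β) :
    xs.foldl (fun acc x => (acc.1 ++ [F x], acc.2 ++ [G x])) (a, b) = (a ++ xs.map F, b ++ xs.map G) := by
  induction xs generalizing a b with
  | nil => simp
  | cons x t ih => simp [ih]

theorem pv_foldl_max_le {α : Type} (key : α → Nat) (K : Nat) :
    ∀ (xs : List α) (a : Nat), a ≤ K → (∀ x ∈ xs, key x ≤ K) →
      xs.foldl (fun m x => max m (key x)) a ≤ K := by
  intro xs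
  induction xs with
  | nil => intro a ha _; simpa using ha
  | cons x t ih =>
    intro a ha hall
    simp only [List.foldl_cons]
    exact ih _ (by have := hall x (by simp); omega) (fun y hy => hall y (by simp [hy]))

-- max(xs, key=len)-style first maximum equals the running fold max from 0 (Nat keys)
theorem pv_foldl_max_eq_max? {α : Type} (key : α → Nat) (xs : List α) (m : α)
    (h : PySem.List.max? xs key = some m) :
    xs.foldl (fun a x => max a (key x)) 0 = key m := by
  have hmem : m ∈ xs := PySem.List.max?_mem h
  have hmax : ∀ y ∈ xs, key y ≤ key m := PySem.List.max?_isMax h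
  apply Nat.le_antisymm
  · exact pv_foldl_max_le key (key m) xs 0 (Nat.zero_le _) hmax
  · have hfold := PySem.List.le_foldl_max (xs.map key) 0
    have : key m ∈ xs.map key := List.mem_map_of_mem hmem
    have := hfold.2 _ this
    simpa [List.foldl_map] using this

-- flatten of lines each ending in '\n' is join-with-'\n' plus a trailing '\n'
theorem pv_flatMap_join (g : α → List Char) :
    ∀ (xs : List α), xs ≠ [] →
      xs.flatMap (fun p => g p ++ ['\n']) = PySem.Chars.join ['\n'] (xs.map g) ++ ['\n'] := by
  intro xs
  induction xs with
  | nil => intro h; exact absurd rfl h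
  | cons x t ih =>
    intro _
    cases t with
    | nil => simp [PySem.Chars.join_singleton]
    | cons y r =>
      rw [List.map_cons, List.map_cons, PySem.Chars.join_cons_cons, ← List.map_cons]
      have := ih (by simp)
      simp only [List.flatMap_cons] at this ⊢
      rw [this]
      simp

theorem pv_rstrip_append_space (x : List Char) (c : Char) (h : PySem.Chars.isspace c = true) :
    PySem.Chars.rstrip (x ++ [c]) = PySem.Chars.rstrip x := by
  simp [PySem.Chars.rstrip, h]

theorem pv_strip_append_newline (x : List Char) :
    PySem.Chars.strip (x ++ ['\n']) = PySem.Chars.strip x := by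
  unfold PySem.Chars.strip PySem.Chars.lstrip
  rw [List.dropWhile_append]
  by_cases h : (List.dropWhile PySem.Chars.isspace x).isEmpty = true
  · have hx : List.dropWhile PySem.Chars.isspace x = [] := by simpa [List.isEmpty_iff] using h
    rw [hx]; decide
  · simp only [h]
    exact pv_rstrip_append_space _ _ (by decide)

theorem pv_zip_map_left {α β : Type} (h : α → β) (xs : List α) :
    (xs.map h).zip xs = xs.map (fun x => (h x, x)) := by
  simpa using (List.zip_map' (f := h) (g := id) (l := xs))

theorem pv_le_foldl_key {α : Type} (key : α → Nat) (xs : List α) (x : α) (hx : x ∈ xs) :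
    key x ≤ xs.foldl (fun a y => max a (key y)) 0 := by
  have := (PySem.List.le_foldl_max (xs.map key) 0).2 (key x) (List.mem_map_of_mem hx)
  simpa [List.foldl_map] using this

-- the common normal form both ports are reduced to
def pvLine (d : PySem.Dict String (List String)) (w1 w2 lq : Nat) (p : String) : List Char :=
  pvLjust (pvF p) w1 ++ "  &  ".toList ++ pvLjust (pvS p) w2 ++ "  -  ".toList
    ++ pvRjust (pvCnt d p) lq ++ [' ']
    ++ (if (d.getD p []).length == 1 then "quote".toList else "quotes".toList)

def pvS2 (d : PySem.Dict String (List String)) (w2 lq : Nat) (p : String) : List Char :=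
  pvLjust (pvS p) w2 ++ "  -  ".toList ++ pvRjust (pvCnt d p) lq

def pvW1 (pairs : List String) : Nat := pairs.foldl (fun a p => max a (pvF p).length) 0
def pvW2 (pairs : List String) : Nat := pairs.foldl (fun a p => max a (pvS p).length) 0
def pvLq (d : PySem.Dict String (List String)) (pairs : List String) : Nat :=
  pairs.foldl (fun a p => max a (pvCnt d p).length) 0

def pvNorm (d : PySem.Dict String (List String)) (pairs : List String) : String :=
  String.mk (PySem.Chars.strip (PySem.Chars.join ['\n']
    (pairs.map (pvLine d (pvW1 pairs) (pvW2 pairs) (pvLq d pairs)))))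

theorem pv_split_pair (p : String) (h : (PySem.Chars.splitOn p.toList ['&']).length = 2) :
    PySem.Chars.splitOn p.toList ['&'] = [(PySem.Chars.splitOn p.toList ['&']).getD 0 [], (PySem.Chars.splitOn p.toList ['&']).getD 1 []] := by
  rcases hsp : PySem.Chars.splitOn p.toList ['&'] with _ | ⟨f, _ | ⟨s, _ | _⟩⟩ <;>
    simp_all

-- generic slice-write lemmas: writing s at offset i into a prefix x followed by spaces
theorem pvWriteStep (x s : List Char) (k i n : Nat) (hx : x.length = n) (hni : n ≤ i)
    (hk : i + s.length ≤ n + k) :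
    pvWrite (x ++ List.replicate k ' ') i s
      = x ++ List.replicate (i - n) ' ' ++ s ++ List.replicate (n + k - i - s.length) ' ' := by
  unfold pvWrite
  rw [List.take_append, List.drop_append,
      List.take_of_length_le (by omega), List.drop_eq_nil_of_le (by omega),
      List.take_replicate, List.drop_replicate]
  simp only [List.nil_append, List.append_assoc, hx]
  congr 2
  · congr 1; omega
  · congr 2; omega

theorem pvWriteStep2 (x s : List Char) (k i n g g' r : Nat) (hx : x.length = n)
    (hi : i = n + g + g') (hk : n + k = i + s.length + r) :
    pvWrite (x ++ List.replicate k ' ') i s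
      = x ++ List.replicate g ' ' ++ List.replicate g' ' ' ++ s ++ List.replicate r ' ' := by
  rw [pvWriteStep x s k i n hx (by omega) (by omega)]
  rw [show i - n = g + g' from by omega, ← List.replicate_append_replicate,
      show n + k - i - s.length = r from by omega]
  simp [List.append_assoc]

theorem pvWriteZero2 (s : List Char) (n r : Nat) (h : n = s.length + r) :
    pvWrite (List.replicate n ' ') 0 s = s ++ List.replicate r ' ' := by
  unfold pvWrite
  simp [List.drop_replicate]
  rw [show n - s.length = r from by omega]

-- the six slice-writes assemble exactly the padded line
theorem pv_grid_assemble (f s c wd : List Char) (w1 w2 w3 : Nat)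
    (h1 : f.length ≤ w1) (h2 : s.length ≤ w2) (h3 : c.length ≤ w3) :
    pvWrite (pvWrite (pvWrite (pvWrite (pvWrite (pvWrite
        (List.replicate (w1 + w2 + w3 + 11 + wd.length) ' ') 0 f)
        (w1 + 2) ['&']) (w1 + 5) s) (w1 + w2 + 7) ['-'])
        (w1 + w2 + w3 + 10 - c.length) c) (w1 + w2 + w3 + 11) wd
      = (f ++ List.replicate (w1 - f.length) ' ') ++ "  &  ".toList
          ++ (s ++ List.replicate (w2 - s.length) ' ') ++ "  -  ".toList
          ++ (List.replicate (w3 - c.length) ' ' ++ c) ++ [' '] ++ wd := by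
  rw [pvWriteZero2 f _ ((w1 - f.length) + (2 + (w2 + w3 + 9 + wd.length))) (by omega)]
  rw [pvWriteStep2 f ['&'] _ _ f.length (w1 - f.length) 2 (w2 + w3 + 8 + wd.length) rfl (by omega) (by simp; omega)]
  rw [pvWriteStep2 _ s _ _ (w1 + 3) 2 0 ((w2 - s.length) + (2 + (w3 + 4 + wd.length))) (by simp; omega) (by omega) (by omega)]
  rw [pvWriteStep2 _ ['-'] _ _ (w1 + 5 + s.length) (w2 - s.length) 2 (w3 + 3 + wd.length) (by simp; omega) (by omega) (by simp; omega)]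
  rw [pvWriteStep2 _ c _ _ (w1 + w2 + 8) 2 (w3 - c.length) (wd.length + 1) (by simp; omega) (by omega) (by omega)]
  rw [pvWriteStep2 _ wd _ _ (w1 + w2 + w3 + 10) 1 0 0 (by simp; omega) (by omega) (by omega)]
  simp [List.append_assoc]

-- one grid-rendered line equals the ljust/rjust normal-form line (given the width bounds)
theorem pv_grid_line (d : PySem.Dict String (List String)) (w1 w2 w3 : Nat) (p : String)
    (h1 : (pvF p).length ≤ w1) (h2 : (pvS p).length ≤ w2) (h3 : (pvCnt d p).length ≤ w3) :
    (let r := pvRow d p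
     let word := if r.2.2.2 == 1 then "quote".toList else "quotes".toList
     let buf := List.replicate (w1 + w2 + w3 + 11 + word.length) ' '
     let buf := pvWrite buf 0 r.1
     let buf := pvWrite buf (w1 + 2) ['&']
     let buf := pvWrite buf (w1 + 5) r.2.1
     let buf := pvWrite buf (w1 + w2 + 7) ['-']
     let buf := pvWrite buf (w1 + w2 + w3 + 10 - r.2.2.1.length) r.2.2.1
     pvWrite buf (w1 + w2 + w3 + 11) word)
      = pvLine d w1 w2 w3 p := by
  simp only [show (pvRow d p).1 = pvF p from rfl, show (pvRow d p).2.1 = pvS p from rfl,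
    show (pvRow d p).2.2.1 = pvCnt d p from rfl,
    show (pvRow d p).2.2.2 = (d.getD p []).length from rfl]
  unfold pvLine pvLjust pvRjust
  exact pv_grid_assemble (pvF p) (pvS p) (pvCnt d p) _ w1 w2 w3 h1 h2 h3

theorem pv_B_eq (quotes : List (String × List String)) :
    get_char_pair_overview_alt quotes
      = pvNorm (PySem.Dict.ofList quotes)
          (PySem.List.sorted ((PySem.Dict.ofList quotes).keys.filter (fun c => PySem.Str.isIn "&" c)) (fun x => x) false) := by
  unfold get_char_pair_overview_alt
  simp only []
  set D := PySem.Dict.ofList quotes with hD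
  set P := PySem.List.sorted (D.keys.filter (fun c => PySem.Str.isIn "&" c)) (fun x => x) false with hP
  -- the widths over rows are the widths over pairs
  have hw1 : (P.map (pvRow D)).foldl (fun m r => max m r.1.length) 0 = pvW1 P := by
    rw [List.foldl_map]; rfl
  have hw2 : (P.map (pvRow D)).foldl (fun m r => max m r.2.1.length) 0 = pvW2 P := by
    rw [List.foldl_map]; rfl
  have hw3 : (P.map (pvRow D)).foldl (fun m r => max m r.2.2.1.length) 0 = pvLq D P := by
    rw [List.foldl_map]; rfl
  rw [hw1, hw2, hw3, List.map_map]
  unfold pvNorm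
  refine congrArg _ (congrArg _ (congrArg _ ?_))
  apply List.map_congr_left
  intro p hp
  have h1 : (pvF p).length ≤ pvW1 P := pv_le_foldl_key (fun q => (pvF q).length) P p hp
  have h2 : (pvS p).length ≤ pvW2 P := pv_le_foldl_key (fun q => (pvS q).length) P p hp
  have h3 : (pvCnt D p).length ≤ pvLq D P := pv_le_foldl_key (fun q => (pvCnt D q).length) P p hp
  exact pv_grid_line D (pvW1 P) (pvW2 P) (pvLq D P) p h1 h2 h3

theorem pv_le_W2 (P : List String) (p : String) (hp : p ∈ P) : (pvS p).length ≤ pvW2 P :=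
  pv_le_foldl_key (fun q => (pvS q).length) P p hp

theorem pv_le_lq (d : PySem.Dict String (List String)) (P : List String) (p : String) (hp : p ∈ P) :
    (pvCnt d p).length ≤ pvLq d P :=
  pv_le_foldl_key (fun q => (pvCnt d q).length) P p hp

theorem pv_s2_len (d : PySem.Dict String (List String)) (w2 lq : Nat) (p : String)
    (h1 : (pvS p).length ≤ w2) (h2 : (pvCnt d p).length ≤ lq) :
    (pvS2 d w2 lq p).length = w2 + 5 + lq := by
  simp [pvS2, pvLjust_len_of_le _ _ h1, pvRjust_len_of_le _ _ h2]
  omega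

theorem pv_A_eq (quotes : List (String × List String))
    (hne : PySem.List.sorted ((PySem.Dict.ofList quotes).keys.filter (fun c => PySem.Str.isIn "&" c)) (fun x => x) false ≠ [])
    (hsplit : ∀ p ∈ PySem.List.sorted ((PySem.Dict.ofList quotes).keys.filter (fun c => PySem.Str.isIn "&" c)) (fun x => x) false,
      (PySem.Chars.splitOn p.toList ['&']).length = 2) :
    get_char_pair_overview quotes
      = pvNorm (PySem.Dict.ofList quotes)
          (PySem.List.sorted ((PySem.Dict.ofList quotes).keys.filter (fun c => PySem.Str.isIn "&" c)) (fun x => x) false) := by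
  unfold get_char_pair_overview
  simp only []
  set D := PySem.Dict.ofList quotes with hD
  set P := PySem.List.sorted (D.keys.filter (fun c => PySem.Str.isIn "&" c)) (fun x => x) false with hP
  -- (1) the split loop builds (P.map pvF, P.map pvS)
  have hbody : ∀ (acc : List (List Char) × List (List Char)), ∀ p ∈ P,
      (match PySem.Chars.splitOn p.toList ['&'] with
       | [f, s] => (acc.1 ++ [PySem.Chars.strip f], acc.2 ++ [PySem.Chars.strip s])
       | _ => acc) = (acc.1 ++ [pvF p], acc.2 ++ [pvS p]) := by
    intro acc p hp
    rw [pv_split_pair p (hsplit p hp)]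
    simp [pvF, pvS]
  rw [PySem.List.foldl_congr_mem P _ _ ([], []) hbody, pv_foldl_two_append pvF pvS P [] []]
  simp only [List.nil_append]
  -- (2) the three max(..., key=len) computations
  rcases hm0 : PySem.List.max? (P.map (fun c => PySem.Int.toChars ((D.getD c []).length : Int))) (fun s => s.length) with _ | m0
  · exact absurd (List.map_eq_nil_iff.mp ((PySem.List.max?_eq_none_iff _ _).mp hm0)) hne
  rcases hm1 : PySem.List.max? (P.map pvF) (fun s => s.length) with _ | m1
  · exact absurd (List.map_eq_nil_iff.mp ((PySem.List.max?_eq_none_iff _ _).mp hm1)) hne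
  rcases hm2 : PySem.List.max? (P.map pvS) (fun s => s.length) with _ | m2
  · exact absurd (List.map_eq_nil_iff.mp ((PySem.List.max?_eq_none_iff _ _).mp hm2)) hne
  simp only []
  have hlq : m0.length = pvLq D P := by
    have h := pv_foldl_max_eq_max? (fun s : List Char => s.length) _ _ hm0
    rw [List.foldl_map] at h
    simpa [pvLq, pvCnt] using h.symm
  have hw1 : m1.length = pvW1 P := by
    have h := pv_foldl_max_eq_max? (fun s : List Char => s.length) _ _ hm1
    rw [List.foldl_map] at h
    simpa [pvW1] using h.symm
  have hw2 : m2.length = pvW2 P := by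
    have h := pv_foldl_max_eq_max? (fun s : List Char => s.length) _ _ hm2
    rw [List.foldl_map] at h
    simpa [pvW2] using h.symm
  rw [hlq, hw1, hw2]
  -- (3) second pass as a map over P
  rw [pv_zip_map_left pvS P]
  simp only [List.map_map]
  have hs2 : ((fun p : List Char × String => pvLjust p.1 (pvW2 P) ++ "  -  ".toList
        ++ pvRjust (PySem.Int.toChars ((D.getD p.2 []).length : Int)) (pvLq D P)) ∘ (fun p => (pvS p, p)))
      = pvS2 D (pvW2 P) (pvLq D P) := by
    funext p
    simp [pvS2, pvCnt]
  rw [hs2]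
  -- (4) longest_str3: every padded second has the same length
  rcases hm3 : PySem.List.max? (P.map (pvS2 D (pvW2 P) (pvLq D P))) (fun s => s.length) with _ | m3
  · exact absurd (List.map_eq_nil_iff.mp ((PySem.List.max?_eq_none_iff _ _).mp hm3)) hne
  simp only []
  obtain ⟨p0, hp0, rfl⟩ := List.mem_map.mp (PySem.List.max?_mem hm3)
  have hm3len : (pvS2 D (pvW2 P) (pvLq D P) p0).length = pvW2 P + 5 + pvLq D P :=
    pv_s2_len D _ _ p0 (pv_le_W2 P p0 hp0) (pv_le_lq D P p0 hp0)
  -- (5) third pass as a map over P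
  rw [pv_zip_map_left (pvS2 D (pvW2 P) (pvLq D P)) P]
  simp only [List.map_map]
  have heq3 : P.map ((fun p : List Char × String =>
        pvLjust p.1 ((pvS2 D (pvW2 P) (pvLq D P) p0).length + 1)
          ++ (if (D.getD p.2 []).length == 1 then "quote".toList else "quotes".toList))
      ∘ (fun p => (pvS2 D (pvW2 P) (pvLq D P) p, p)))
      = P.map (fun p => pvS2 D (pvW2 P) (pvLq D P) p ++ [' ']
          ++ (if (D.getD p []).length == 1 then "quote".toList else "quotes".toList)) := by
    apply List.map_congr_left
    intro p hp
    simp only [Function.comp]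
    rw [hm3len, show pvW2 P + 5 + pvLq D P = (pvS2 D (pvW2 P) (pvLq D P) p).length from
      (pv_s2_len D _ _ p (pv_le_W2 P p hp) (pv_le_lq D P p hp)).symm, pvLjust_succ_self]
  rw [heq3]
  -- (6) overview accumulation is a flatMap; lines coincide with pvLine
  rw [PySem.List.foldl_append_eq_flatMap (fun p : List Char × List Char => p.1 ++ p.2 ++ ['\n'])]
  rw [List.zip_map', List.flatMap_map]
  simp only [List.nil_append]
  refine Eq.trans (congrArg (fun t => String.mk (PySem.Chars.strip (List.flatMap t P)))
      (?_ : _ = fun p => pvLine D (pvW1 P) (pvW2 P) (pvLq D P) p ++ ['\n'])) ?_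
  · funext p
    simp [pvLine, pvS2, pvCnt]
  · simp only []
    rw [pv_flatMap_join _ P hne, pv_strip_append_newline]
    rfl

-- ===== VERDICT =====
theorem get_char_pair_overview_spec : Claim_equal_get_char_pair_overview := by
  intro quotes _ hpre
  unfold Pre_get_char_pair_overview at hpre
  simp only [] at hpre
  obtain ⟨hne0, hsplit0⟩ := hpre
  have hne : PySem.List.sorted ((PySem.Dict.ofList quotes).keys.filter (fun c => PySem.Str.isIn "&" c)) (fun x => x) false ≠ [] := by
    intro h
    exact hne0 ((PySem.List.sorted_eq_nil_iff _ _ _).mp h)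
  have hsplit : ∀ p ∈ PySem.List.sorted ((PySem.Dict.ofList quotes).keys.filter (fun c => PySem.Str.isIn "&" c)) (fun x => x) false,
      (PySem.Chars.splitOn p.toList ['&']).length = 2 := by
    intro p hp
    exact hsplit0 p ((PySem.List.mem_sorted _ _ _ _).mp hp)
  unfold Spec_get_char_pair_overview
  rw [pv_A_eq quotes hne hsplit, pv_B_eq quotes]
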